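-- pv_equiv track=rewrite | github.com/IsYuchenYuan/ContextSAM | func_3d/dataset_save/data_utils.py | remove_discontinuous
-- ===== SOURCE A (Python) =====
-- def remove_discontinuous(z_index):
--     if len(z_index) <= 1:
--         return z_index
--
--     result = []
--     for i in range(len(z_index)):
--         is_continuous = False
--
--         # Check with previous number
--         if i > 0 and abs(z_index[i] - z_index[i - 1]) == 1:
--             is_continuous = True
--
--         # Check with next number
--         if i < len(z_index) - 1 and abs(z_index[i] - z_index[i + 1]) == 1:
--             is_continuous = True
--
--         if is_continuous:
--             result.append(z_index[i])
--
--     return result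
-- ===== SOURCE B (Python) =====
-- def remove_discontinuous(z_index):
--     if len(z_index) <= 1:
--         return z_index
--
--     out = []
--     n = len(z_index)
--     i = 0
--     while i < n:
--         # scan the maximal run of pairwise-adjacent elements starting at i
--         j = i + 1
--         while j < n and abs(z_index[j] - z_index[j - 1]) == 1:
--             j += 1
--         # a run of length >= 2 is kept whole; an isolated element is dropped
--         if j - i >= 2:
--             out.extend(z_index[i:j])
--         i = j
--     return out
-- ===== Notes on version B (the rewrite author's own statement) =====
-- stated objective: alternative
-- what changed: B partitions the list into maximal runs of consecutive +/-1-adjacent elements (outer loop over runs, inner loop scanning one run) and emits only runs of length >= 2, instead of A's single per-element pass that re-examines both neighbors of every index.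
import Mathlib
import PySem

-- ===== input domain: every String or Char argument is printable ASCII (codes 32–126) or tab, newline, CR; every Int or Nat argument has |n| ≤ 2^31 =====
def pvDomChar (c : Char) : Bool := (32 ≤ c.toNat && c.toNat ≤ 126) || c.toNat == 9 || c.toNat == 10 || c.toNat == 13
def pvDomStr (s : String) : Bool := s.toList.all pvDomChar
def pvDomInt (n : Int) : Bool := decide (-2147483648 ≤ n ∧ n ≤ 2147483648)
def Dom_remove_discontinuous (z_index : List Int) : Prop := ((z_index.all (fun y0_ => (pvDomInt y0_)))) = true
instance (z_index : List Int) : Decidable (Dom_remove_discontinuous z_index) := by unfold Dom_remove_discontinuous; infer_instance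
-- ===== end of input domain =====

-- B groups the list into maximal runs of ±1-adjacent elements and keeps runs of length ≥ 2,
-- instead of A's per-element check of both neighbors (alternative decomposition, same cost).


-- ===== PORT A =====
def remove_discontinuous (z_index : List Int) : List Int :=
  if z_index.length ≤ 1 then z_index
  else
    (PySem.List.pyRange 0 (z_index.length : Int) 1).foldl
      (fun result i =>
        let is_continuous := false
        -- Check with previous number
        let is_continuous :=
          if decide (0 < i) &&
              ((PySem.List.pyGetD z_index i 0 - PySem.List.pyGetD z_index (i - 1) 0).natAbs == 1)
          then true else is_continuous
        -- Check with next number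
        let is_continuous :=
          if decide (i < (z_index.length : Int) - 1) &&
              ((PySem.List.pyGetD z_index i 0 - PySem.List.pyGetD z_index (i + 1) 0).natAbs == 1)
          then true else is_continuous
        if is_continuous then result ++ [PySem.List.pyGetD z_index i 0] else result)
      []

-- ===== PORT B =====
-- Source B's outer while-loop advances from one maximal run to the next; it is ported as the
-- recursion pvRuns over the remaining suffix.  The inner while-loop that scans a single run
-- (comparing each next element with the previous one) is ported as pvTakeRun.  The
-- `out.extend` under the `j - i >= 2` test is the fold over the runs below.
def pvTakeRun (x : Int) : List Int → List Int × List Int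
  | [] => ([], [])
  | y :: t =>
    if (y - x).natAbs == 1 then
      let p := pvTakeRun y t
      (y :: p.1, p.2)
    else ([], y :: t)

theorem pvTakeRun_len (x : Int) (t : List Int) : (pvTakeRun x t).2.length ≤ t.length := by
  induction t generalizing x with
  | nil => simp [pvTakeRun]
  | cons y t ih =>
    simp only [pvTakeRun]
    split
    · exact Nat.le_succ_of_le (ih y)
    · simp

def pvRuns : List Int → List (List Int)
  | [] => []
  | x :: t =>
    let p := pvTakeRun x t
    (x :: p.1) :: pvRuns p.2
termination_by l => l.length
decreasing_by exact Nat.lt_succ_of_le (pvTakeRun_len x t)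

def remove_discontinuous_alt (z_index : List Int) : List Int :=
  if z_index.length ≤ 1 then z_index
  else
    (pvRuns z_index).foldl
      (fun out r => if 2 ≤ r.length then out ++ r else out) []

-- ===== PRECONDITION & SPEC =====
def Spec_remove_discontinuous (z_index : List Int) (out : List Int) : Prop := out = remove_discontinuous_alt z_index
instance (z_index : List Int) (out : List Int) : Decidable (Spec_remove_discontinuous z_index out) := by unfold Spec_remove_discontinuous; infer_instance

-- ===== CLAIM (what is proved, stated in full; the proofs are below) =====
def Claim_equal_remove_discontinuous : Prop := ∀ (z_index : List Int), Dom_remove_discontinuous z_index → Spec_remove_discontinuous z_index (remove_discontinuous z_index)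

-- ===== LEMMAS AND PROOFS =====

-- |x - y| == 1 on the integers (symmetric)
def adjB (x y : Int) : Bool := (x - y).natAbs == 1

theorem adjB_comm (x y : Int) : adjB x y = adjB y x := by
  simp only [adjB]
  have : (x - y).natAbs = (y - x).natAbs := by omega
  rw [this]

-- reference semantics with a carried flag: b says "previous pair was adjacent"
def G (b : Bool) : List Int → List Int
  | [] => []
  | [x] => if b then [x] else []
  | x :: y :: t => (if b || adjB x y then [x] else []) ++ G (adjB x y) (y :: t)

-- ---- B side: pvRuns/pvTakeRun compute G ----

theorem takeRun_G (t : List Int) : ∀ x : Int,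
    G true (x :: t) = (x :: (pvTakeRun x t).1) ++ G false (pvTakeRun x t).2 ∧
    G false (x :: t) =
      (if (pvTakeRun x t).1 = [] then [] else x :: (pvTakeRun x t).1) ++
        G false (pvTakeRun x t).2 := by
  induction t with
  | nil => intro x; simp [pvTakeRun, G]
  | cons y t ih =>
    intro x
    by_cases h : ((y - x).natAbs == 1) = true
    · have hadj : adjB x y = true := by
        simp only [adjB]
        have : (x - y).natAbs = (y - x).natAbs := by omega
        rw [this]; exact h
      obtain ⟨ih1, _⟩ := ih y
      constructor <;>
        simp [pvTakeRun, h, G, hadj, ih1]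
    · have hadj : adjB x y = false := by
        simp only [adjB]
        have : (x - y).natAbs = (y - x).natAbs := by omega
        rw [this]; simpa using h
      constructor <;> simp [pvTakeRun, h, G, hadj]

theorem foldl_runs (rs : List (List Int)) : ∀ acc : List Int,
    rs.foldl (fun out r => if 2 ≤ r.length then out ++ r else out) acc
      = acc ++ rs.flatMap (fun r => if 2 ≤ r.length then r else []) := by
  induction rs with
  | nil => intro acc; simp
  | cons r rs ih =>
    intro acc
    simp only [List.foldl_cons, List.flatMap_cons, ih]
    split <;> simp

theorem runs_G : ∀ z : List Int,
    (pvRuns z).flatMap (fun r => if 2 ≤ r.length then r else []) = G false z := by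
  intro z
  induction z using pvRuns.induct with
  | case1 => simp [pvRuns, G]
  | case2 x t p ih =>
    rw [pvRuns]
    simp only [List.flatMap_cons]
    rw [show p.2 = (pvTakeRun x t).2 from rfl] at ih
    rw [ih]
    obtain ⟨_, h2⟩ := takeRun_G t x
    rw [h2]
    cases hr : (pvTakeRun x t).1 <;> simp [hr]

-- ---- A side: the fold equals the filtered-index view equals G ----

-- A's per-index condition (on the full list, false flag)
def condA' (b : Bool) (l : List Int) (i : Nat) : Bool :=
  (if i = 0 then b else adjB (l.getD i 0) (l.getD (i - 1) 0)) ||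
  (decide (i < l.length - 1) && adjB (l.getD i 0) (l.getD (i + 1) 0))

theorem condA'_succ (b : Bool) (x y : Int) (t : List Int) (i : Nat) :
    condA' b (x :: y :: t) (i + 1) = condA' (adjB x y) (y :: t) i := by
  cases i with
  | zero => simp [condA', adjB_comm x y]
  | succ j => simp [condA']

-- the filtered-index view equals G
theorem filter_eq_G (l : List Int) : ∀ (x : Int) (b : Bool),
    ((List.range (x :: l).length).filter (condA' b (x :: l))).map ((x :: l).getD · 0)
      = G b (x :: l) := by
  induction l with
  | nil => intro x b; cases b <;> simp [condA', G]
  | cons y t ih =>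
    intro x b
    rw [show (x :: y :: t).length = (y :: t).length + 1 from rfl, List.range_succ_eq_map,
       List.filter_cons]
    have h0 : condA' b (x :: y :: t) 0 = (b || adjB x y) := by
      simp [condA']
    have hmap : (List.map Nat.succ (List.range (y :: t).length)).filter (condA' b (x :: y :: t))
        = ((List.range (y :: t).length).filter (condA' (adjB x y) (y :: t))).map Nat.succ := by
      rw [List.filter_map]
      congr 1
      apply List.filter_congr
      intro i _
      simpa [Function.comp] using condA'_succ b x y t i
    rw [h0, hmap]
    have ih' := ih y (adjB x y)
    have hcomp : ((x :: y :: t).getD · 0) ∘ Nat.succ = ((y :: t).getD · 0) := rfl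
    rcases Bool.eq_false_or_eq_true (b || adjB x y) with hb | hb
    · rw [if_pos hb, List.map_cons, List.map_map, hcomp, ih']
      simp [G, hb]
    · rw [if_neg (by simp [hb]), List.map_map, hcomp, ih']
      simp [G, hb]

-- A's fold over pyRange equals the filtered-index view, for length ≥ 2
theorem A_eq_filter (x y : Int) (t : List Int) :
    remove_discontinuous (x :: y :: t)
      = ((List.range (x :: y :: t).length).filter (condA' false (x :: y :: t))).map
          ((x :: y :: t).getD · 0) := by
  set z := x :: y :: t with hz
  have hlen : ¬ z.length ≤ 1 := by simp [hz]
  simp only [remove_discontinuous, if_neg hlen]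
  rw [PySem.List.pyRange_zero_natCast, List.foldl_map]
  have hbody : ∀ (r : List Int) (k : Nat), k ∈ List.range z.length →
      (fun result (i : Int) =>
        let is_continuous := false
        let is_continuous :=
          if decide (0 < i) &&
              ((PySem.List.pyGetD z i 0 - PySem.List.pyGetD z (i - 1) 0).natAbs == 1)
          then true else is_continuous
        let is_continuous :=
          if decide (i < (z.length : Int) - 1) &&
              ((PySem.List.pyGetD z i 0 - PySem.List.pyGetD z (i + 1) 0).natAbs == 1)
          then true else is_continuous
        if is_continuous then result ++ [PySem.List.pyGetD z i 0] else result) r (k : Int)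
      = (fun result k => if condA' false z k then result ++ [z.getD k 0] else result) r k := by
    intro r k _
    simp only
    have hk1 : PySem.List.pyGetD z (k : Int) 0 = z.getD k 0 := PySem.List.pyGetD_natCast z k 0
    have hk3 : PySem.List.pyGetD z ((k : Int) + 1) 0 = z.getD (k + 1) 0 := by
      rw [show ((k : Int) + 1) = ((k + 1 : Nat) : Int) by push_cast; ring]
      exact PySem.List.pyGetD_natCast z (k + 1) 0
    have hlt : (decide ((k : Int) < (z.length : Int) - 1)) = decide (k < z.length - 1) := by
      simp only [decide_eq_decide]
      omega
    cases k with
    | zero =>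
      simp [condA', adjB, PySem.List.pyGetD_ofNat']
    | succ j =>
      have hk2 : PySem.List.pyGetD z ((j + 1 : Nat) - 1 : Int) 0 = z.getD j 0 := by
        rw [show (((j + 1 : Nat) : Int) - 1) = ((j : Nat) : Int) by push_cast; ring]
        exact PySem.List.pyGetD_natCast z j 0
      have hpos : decide (0 < ((j + 1 : Nat) : Int)) = true := by simp
      simp only [condA', hk1, hk2, hk3, hlt, hpos, Bool.true_and, adjB,
        Nat.add_sub_cancel, if_neg (Nat.succ_ne_zero j)]
      cases h1 : ((z.getD (j + 1) 0 - z.getD j 0).natAbs == 1) <;>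
        cases h2 : (decide (j + 1 < z.length - 1) && ((z.getD (j + 1) 0 - z.getD (j + 1 + 1) 0).natAbs == 1)) <;>
        simp
  rw [PySem.List.foldl_congr_mem _ _ _ _ hbody]
  exact PySem.List.foldl_append_if (condA' false z) (z.getD · 0) (List.range z.length) []

-- ===== VERDICT (by name: the statement is the Claim_ definition above) =====
theorem remove_discontinuous_spec : Claim_equal_remove_discontinuous := by
  intro z _
  unfold Spec_remove_discontinuous
  match z with
  | [] => rfl
  | [x] => rfl
  | x :: y :: t =>
    rw [A_eq_filter, filter_eq_G]
    rw [remove_discontinuous_alt, if_neg (by simp)]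
    rw [foldl_runs, runs_G]
    simp
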